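-- pv_equiv track=rewrite | github.com/sohds/Perfume-Description-Maker | raw/youtube_crawling.py | clean_caption_text
-- ===== SOURCE A (Python) =====
-- def clean_caption_text(content):
--     """VTT 형식의 자막에서 실제 텍스트만 추출합니다."""
--     lines = content.split('\n')
--     caption_text = []
--     is_text_line = False
--     current_text = []
--
--     for line in lines:
--         # WEBVTT 헤더 스킵
--         if 'WEBVTT' in line or 'Kind:' in line or 'Language:' in line:
--             continue
--
--         # 타임스탬프 줄 확인 (예: 00:00:00.000 --> 00:00:02.000)
--         if '-->' in line:
--             # 이전 텍스트가 있으면 저장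
--             if current_text:
--                 caption_text.append(' '.join(current_text))
--                 current_text = []
--             continue
--
--         # 숫자로만 된 줄 (자막 번호) 스킵
--         if line.strip().isdigit():
--             continue
--
--         # 실제 자막 텍스트 처리
--         text = line.strip()
--         if text and not '-->' in text:
--             current_text.append(text)
--
--     # 마지막 텍스트 처리
--     if current_text:
--         caption_text.append(' '.join(current_text))
--
--     # 중복 제거 및 정리
--     final_text = []
--     prev_text = None
--
--     for text in caption_text:
--         text = text.strip()
--         if text and text != prev_text:
--             final_text.append(text)
--             prev_text = text
--
--     return '\n'.join(final_text)
-- ===== SOURCE B (Python) =====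
-- def clean_caption_text(content):
--     """VTT 형식의 자막에서 실제 텍스트만 추출합니다.
--
--     Index-based version: locate all timestamp separator lines first, then
--     slice the line list into blocks between consecutive separators, turn
--     each slice into its cleaned text, and drop empty / adjacent-duplicate
--     blocks with comprehensions."""
--     lines = content.split('\n')
--     sep_idx = [i for i, l in enumerate(lines)
--                if '-->' in l and 'WEBVTT' not in l
--                and 'Kind:' not in l and 'Language:' not in l]
--     bounds = [-1] + sep_idx + [len(lines)]
--     groups = [' '.join(l.strip() for l in lines[a + 1:b]
--                        if l.strip() and not l.strip().isdigit()
--                        and 'WEBVTT' not in l and 'Kind:' not in l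
--                        and 'Language:' not in l).strip()
--               for a, b in zip(bounds, bounds[1:])]
--     blocks = [g for g in groups if g]
--     return '\n'.join(g for i, g in enumerate(blocks)
--                      if i == 0 or g != blocks[i - 1])
-- ===== Notes on version B (the rewrite author's own statement) =====
-- stated objective: alternative
-- what changed: Replaces A's streaming state machine (current_text buffer flushed on timestamp lines, then a second prev-tracking dedup loop) with an index-based decomposition: first compute the list of separator-line indices, then slice the line list between consecutive separators, map each slice to its cleaned joined text, and remove empty and adjacent-duplicate blocks with stateless comprehensions comparing blocks[i-1].
import Mathlib
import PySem

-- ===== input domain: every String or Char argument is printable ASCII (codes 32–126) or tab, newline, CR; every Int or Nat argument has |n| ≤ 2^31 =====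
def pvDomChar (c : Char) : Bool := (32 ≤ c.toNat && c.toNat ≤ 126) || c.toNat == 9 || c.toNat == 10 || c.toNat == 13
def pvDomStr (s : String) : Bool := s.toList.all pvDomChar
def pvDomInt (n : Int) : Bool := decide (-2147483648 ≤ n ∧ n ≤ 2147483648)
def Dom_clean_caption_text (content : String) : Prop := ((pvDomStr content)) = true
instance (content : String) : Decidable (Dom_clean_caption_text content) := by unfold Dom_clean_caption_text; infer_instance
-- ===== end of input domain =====

-- B replaces A's streaming state machine (flush-on-timestamp buffer + second dedup pass)
-- by an index-based decomposition: find separator indices, slice the lines between them,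
-- map each slice to its cleaned text, drop empty/adjacent-duplicate blocks; objective: alternative.

-- ===== PORT A =====
-- one iteration of A's first loop; state = (caption_text, current_text)
-- 'WEBVTT' in line or 'Kind:' in line or 'Language:' in line
def pvHdrA (l : String) : Bool :=
  PySem.Str.isIn "WEBVTT" l || PySem.Str.isIn "Kind:" l || PySem.Str.isIn "Language:" l

-- '-->' in l
def pvTs (l : String) : Bool := PySem.Str.isIn "-->" l

-- line.strip().isdigit()
def pvDig (l : String) : Bool := PySem.Str.strIsdigit (PySem.Str.strip l)

def pvAStep (st : List String × List String) (line : String) : List String × List String :=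
  if pvHdrA line then st
  else if pvTs line then
    (if st.2 ≠ [] then (st.1 ++ [PySem.Str.join " " st.2], []) else st)
  else if pvDig line then st
  else if PySem.Str.strip line ≠ "" ∧ ¬ (pvTs (PySem.Str.strip line) = true) then
    (st.1, st.2 ++ [PySem.Str.strip line])
  else st

-- one iteration of A's second (dedup) loop; state = (final_text, prev_text)
def pvDedupStep (st : List String × Option String) (t : String) : List String × Option String :=
  if PySem.Str.strip t ≠ "" ∧ some (PySem.Str.strip t) ≠ st.2 then
    (st.1 ++ [PySem.Str.strip t], some (PySem.Str.strip t))
  else st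

def clean_caption_text (content : String) : String :=
  -- content.split('\n'): sep is the non-empty "\n", so split? is `some` (getD never fires)
  let lines := (PySem.Str.split? content "\n").getD []
  let st := lines.foldl pvAStep ([], [])
  let caption_text := if st.2 ≠ [] then st.1 ++ [PySem.Str.join " " st.2] else st.1
  let fin := caption_text.foldl pvDedupStep ([], none)
  PySem.Str.join "\n" fin.1

-- ===== PORT B =====
-- separator-line test of B's sep_idx comprehension
def pvSep (l : String) : Bool := pvTs l && !pvHdrA l

-- the filter of B's inner generator: l.strip() and not l.strip().isdigit() and not header
def pvCondB (l : String) : Bool :=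
  PySem.Str.strip l != "" && !pvDig l && !pvHdrA l

-- ' '.join(l.strip() for l in seg if …).strip()
def pvGroup (seg : List String) : String :=
  PySem.Str.strip (PySem.Str.join " " ((seg.filter pvCondB).map PySem.Str.strip))

def clean_caption_text_alt (content : String) : String :=
  let lines := (PySem.Str.split? content "\n").getD []
  let sepIdx := ((PySem.List.enumerate lines).filter (fun p => pvSep p.2)).map (·.1)
  let bounds := (-1 : Int) :: sepIdx ++ [(lines.length : Int)]
  let groups := (bounds.zip bounds.tail).map
      (fun ab => pvGroup (PySem.List.slice lines (some (ab.1 + 1)) (some ab.2)))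
  let blocks := groups.filter (fun g => g != "")
  PySem.Str.join "\n" (((PySem.List.enumerate blocks).filter
      (fun p => p.1 == 0 || PySem.List.pyGet? blocks (p.1 - 1) != some p.2)).map (·.2))

-- ===== PRECONDITION & SPEC =====
def Spec_clean_caption_text (content : String) (out : String) : Prop := out = clean_caption_text_alt content
instance (content : String) (out : String) : Decidable (Spec_clean_caption_text content out) := by unfold Spec_clean_caption_text; infer_instance

-- ===== CLAIM (what is proved, stated in full; the proofs are below) =====
def Claim_equal_clean_caption_text : Prop := ∀ (content : String), Dom_clean_caption_text content → Spec_clean_caption_text content (clean_caption_text content)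

-- ===== LEMMAS AND PROOFS =====

-- raw line segments between separator lines: (first segment, later segments)
def pvSegs : List String → List String × List (List String)
  | [] => ([], [])
  | l :: ls =>
    let r := pvSegs ls
    if pvSep l then ([], r.1 :: r.2) else (l :: r.1, r.2)

-- the cleaned text lines of one raw segment
def pvProc (seg : List String) : List String := (seg.filter pvCondB).map PySem.Str.strip

-- joins of the nonempty blocks (A's caption_text, per block)
def pvJoins (bs : List (List String)) : List String :=
  bs.filterMap (fun b => if b = [] then none else some (PySem.Str.join " " b))

-- separator indices starting at s
def pvIdxAux : List String → Int → List Int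
  | [], _ => []
  | l :: ls, s => (if pvSep l then [s] else []) ++ pvIdxAux ls (s + 1)

-- adjacent dedup with an optional previous value
def pvAdj : Option String → List String → List String
  | _, [] => []
  | prev, x :: xs => if some x = prev then pvAdj prev xs else x :: pvAdj (some x) xs

-- adjacent dedup against the literal predecessor
def pvRun (p : String) : List String → List String
  | [] => []
  | y :: ys => if y = p then pvRun y ys else y :: pvRun y ys

-- strip only removes characters at the ends
theorem pvStrip_infix (cs : List Char) : PySem.Chars.strip cs <:+: cs := by
  unfold PySem.Chars.strip PySem.Chars.rstrip PySem.Chars.lstrip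
  have h1 : List.dropWhile PySem.Chars.isspace cs <:+ cs := List.dropWhile_suffix _
  have h3 := List.dropWhile_suffix (l := (List.dropWhile PySem.Chars.isspace cs).reverse)
      (p := PySem.Chars.isspace)
  have h2 : (List.dropWhile PySem.Chars.isspace
        (List.dropWhile PySem.Chars.isspace cs).reverse).reverse
      <+: List.dropWhile PySem.Chars.isspace cs :=
    (List.reverse_suffix
      (l₁ := (List.dropWhile PySem.Chars.isspace
        (List.dropWhile PySem.Chars.isspace cs).reverse).reverse)
      (l₂ := List.dropWhile PySem.Chars.isspace cs)).mp (by simpa using h3)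
  exact h2.isInfix.trans h1.isInfix

-- a substring of the stripped line is a substring of the line
theorem pvIsIn_strip (l : String) : pvTs l = false → pvTs (PySem.Str.strip l) = false := by
  intro h
  by_contra hc
  have hc' : pvTs (PySem.Str.strip l) = true := by
    cases hx : pvTs (PySem.Str.strip l) <;> simp_all
  unfold pvTs at *
  rw [PySem.Str.isIn_iff_infix, PySem.Str.toList_strip] at hc'
  rw [← Bool.not_eq_true, PySem.Str.isIn_iff_infix] at h
  exact h (hc'.trans (pvStrip_infix l.toList))

-- A's first loop computes the joined nonempty blocks
theorem pvA_char (lines : List String) : ∀ (ct cur : List String),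
    (let st := lines.foldl pvAStep (ct, cur)
     if st.2 ≠ [] then st.1 ++ [PySem.Str.join " " st.2] else st.1)
    = ct ++ pvJoins ((cur ++ pvProc (pvSegs lines).1) :: (pvSegs lines).2.map pvProc) := by
  induction lines with
  | nil =>
    intro ct cur
    by_cases h : cur = [] <;> simp [pvSegs, pvProc, pvJoins, h]
  | cons l ls ih =>
    intro ct cur
    simp only [List.foldl_cons]
    by_cases h1 : pvHdrA l
    · have hA : pvAStep (ct, cur) l = (ct, cur) := by unfold pvAStep; simp [h1]
      have hcB : pvCondB l = false := by simp [pvCondB, h1]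
      have hsep : pvSep l = false := by simp [pvSep, h1]
      simp only [hA, pvSegs, hsep, Bool.false_eq_true, if_false]
      rw [ih ct cur]
      simp [pvProc, hcB]
    · by_cases h2 : pvTs l
      · have hA : pvAStep (ct, cur) l
            = (if cur ≠ [] then ct ++ [PySem.Str.join " " cur] else ct, []) := by
          unfold pvAStep
          simp only [h1, h2, Bool.false_eq_true, if_false, if_true]
          split_ifs <;> simp_all
        have hsep : pvSep l = true := by simp [pvSep, h1, h2]
        simp only [hA, pvSegs, hsep, if_true]
        rw [ih _ []]
        by_cases h : cur = [] <;>
          simp [pvJoins, pvProc, h, List.append_assoc]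
      · have h2f : pvTs l = false := by simp [h2]
        have hsep : pvSep l = false := by simp [pvSep, h2f]
        have h2s : pvTs (PySem.Str.strip l) = false := pvIsIn_strip l h2f
        by_cases h3 : pvDig l
        · have hA : pvAStep (ct, cur) l = (ct, cur) := by
            unfold pvAStep; simp [h1, h2f, h3]
          have hcB : pvCondB l = false := by simp [pvCondB, h3]
          simp only [hA, pvSegs, hsep, Bool.false_eq_true, if_false]
          rw [ih ct cur]
          simp [pvProc, hcB]
        · by_cases h4 : PySem.Str.strip l = ""
          · have hA : pvAStep (ct, cur) l = (ct, cur) := by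
              unfold pvAStep; simp [h1, h2f, h3, h4]
            have hcB : pvCondB l = false := by simp [pvCondB, h4]
            simp only [hA, pvSegs, hsep, Bool.false_eq_true, if_false]
            rw [ih ct cur]
            simp [pvProc, hcB]
          · have hA : pvAStep (ct, cur) l = (ct, cur ++ [PySem.Str.strip l]) := by
              unfold pvAStep; simp [h1, h2f, h3, h4, h2s]
            have hcB : pvCondB l = true := by simp [pvCondB, h1, h3, h4]
            simp only [hA, pvSegs, hsep, Bool.false_eq_true, if_false]
            rw [ih ct (cur ++ [PySem.Str.strip l])]
            simp [pvProc, hcB, List.append_assoc]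

-- enumerate-filter-map computes pvIdxAux
theorem pvIdx_char (ls : List String) : ∀ (s : Int),
    ((PySem.List.enumerate ls s).filter (fun p => pvSep p.2)).map (·.1) = pvIdxAux ls s := by
  induction ls with
  | nil => intro s; simp [PySem.List.enumerate_nil, pvIdxAux]
  | cons l ls ih =>
    intro s
    rw [PySem.List.enumerate_cons]
    by_cases h : pvSep l <;> simp [pvIdxAux, h, ih]

theorem pvIdxAux_shift (ls : List String) : ∀ (s : Int),
    pvIdxAux ls (s + 1) = (pvIdxAux ls s).map (· + 1) := by
  induction ls with
  | nil => intro s; simp [pvIdxAux]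
  | cons l ls ih =>
    intro s
    by_cases h : pvSep l <;> simp [pvIdxAux, h, ih (s + 1)]

theorem pvIdxAux_le (ls : List String) : ∀ (s x : Int), x ∈ pvIdxAux ls s → s ≤ x := by
  induction ls with
  | nil => intro s x h; simp [pvIdxAux] at h
  | cons l ls ih =>
    intro s x h
    by_cases hs : pvSep l <;> simp [pvIdxAux, hs] at h
    · rcases h with h | h
      · omega
      · have := ih (s + 1) x h; omega
    · have := ih (s + 1) x h; omega

-- adjacent pairs of a list
def pvPairs (xs : List Int) : List (Int × Int) := xs.zip xs.tail

theorem pvPairs_cons₂ (a b : Int) (t : List Int) :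
    pvPairs (a :: b :: t) = (a, b) :: pvPairs (b :: t) := by
  simp [pvPairs, List.zip_cons_cons]

theorem pvPairs_map (xs : List Int) :
    pvPairs (xs.map (· + 1)) = (pvPairs xs).map (fun p => (p.1 + 1, p.2 + 1)) := by
  unfold pvPairs
  rw [← List.map_tail, List.zip_map]
  rfl

-- dropping one leading element shifts a nonnegative slice window by one
theorem pvSlice_shift (x : String) (xs : List String) (a b : Int) (ha : 0 ≤ a) (hb : 0 ≤ b) :
    PySem.List.slice (x :: xs) (some (a + 1)) (some (b + 1)) = PySem.List.slice xs (some a) (some b) := by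
  rw [PySem.List.slice_toNat _ (by omega) (by omega), PySem.List.slice_toNat _ ha hb]
  rw [show (a + 1).toNat = a.toNat + 1 from by omega, show (b + 1).toNat = b.toNat + 1 from by omega]
  rw [show b.toNat + 1 - (a.toNat + 1) = b.toNat - a.toNat from by omega, List.drop_succ_cons]

theorem pvSlice_cons_zero (x : String) (xs : List String) (b : Int) (hb : 0 ≤ b) :
    PySem.List.slice (x :: xs) (some 0) (some (b + 1)) = x :: PySem.List.slice xs (some 0) (some b) := by
  rw [PySem.List.slice_toNat _ (by omega) (by omega), PySem.List.slice_toNat _ le_rfl hb]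
  rw [show (b + 1).toNat = b.toNat + 1 from by omega]
  simp [List.take_succ_cons]

-- slicing between consecutive bounds = the structural segments
-- slicing between consecutive bounds = the structural segments
theorem pvSlice_char (ls : List String) :
    (((-1 : Int) :: pvIdxAux ls 0 ++ [(ls.length : Int)]).zip
        (((-1 : Int) :: pvIdxAux ls 0 ++ [(ls.length : Int)]).tail)).map
      (fun ab => PySem.List.slice ls (some (ab.1 + 1)) (some ab.2))
    = (pvSegs ls).1 :: (pvSegs ls).2 := by
  induction ls with
  | nil =>
    show (pvPairs ((-1 : Int) :: pvIdxAux [] 0 ++ [((0 : Nat) : Int)])).map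
        (fun ab => PySem.List.slice ([] : List String) (some (ab.1 + 1)) (some ab.2))
      = (pvSegs ([] : List String)).1 :: (pvSegs ([] : List String)).2
    rw [show ((-1 : Int) :: pvIdxAux [] 0 ++ [((0 : Nat) : Int)]) = [(-1 : Int), 0] from by
      simp [pvIdxAux]]
    rw [pvPairs_cons₂]
    simp only [pvPairs, List.tail_cons, List.zip_nil_right, List.map_cons, List.map_nil]
    rw [show (-1 : Int) + 1 = 0 from by ring, PySem.List.slice_toNat _ le_rfl le_rfl]
    simp [pvSegs]
  | cons l ls ih =>
    have hTpos : ∀ x ∈ pvIdxAux ls 0 ++ [(ls.length : Int)], 0 ≤ x := by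
      intro x hx
      rcases List.mem_append.mp hx with h | h
      · exact pvIdxAux_le ls 0 x h
      · simp at h; omega
    have ih' : (pvPairs ((-1 : Int) :: pvIdxAux ls 0 ++ [(ls.length : Int)])).map
        (fun ab => PySem.List.slice ls (some (ab.1 + 1)) (some ab.2))
      = (pvSegs ls).1 :: (pvSegs ls).2 := ih
    obtain ⟨t0, T', hT⟩ : ∃ t0 T', pvIdxAux ls 0 ++ [(ls.length : Int)] = t0 :: T' := by
      cases h : pvIdxAux ls 0 ++ [(ls.length : Int)] with
      | nil => exact absurd h (by simp)
      | cons a t => exact ⟨a, t, rfl⟩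
    have ht0 : 0 ≤ t0 := hTpos t0 (by rw [hT]; exact List.mem_cons_self ..)
    have hshift : ∀ p ∈ pvPairs ((-1 : Int) :: pvIdxAux ls 0 ++ [(ls.length : Int)]),
        PySem.List.slice (l :: ls) (some (p.1 + 1 + 1)) (some (p.2 + 1))
          = PySem.List.slice ls (some (p.1 + 1)) (some p.2) := by
      intro p hp
      obtain ⟨p1, p2⟩ := p
      have h12 := List.of_mem_zip hp
      have h1 : -1 ≤ p1 := by
        rcases List.mem_cons.mp h12.1 with h | h
        · omega
        · have := hTpos p1 h; omega
      have h2 : 0 ≤ p2 := hTpos p2 (by simpa using h12.2)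
      exact pvSlice_shift l ls (p1 + 1) p2 (by omega) h2
    have hlen : (((l :: ls).length : Nat) : Int) = (ls.length : Int) + 1 := by
      push_cast [List.length_cons]; ring
    show (pvPairs ((-1 : Int) :: pvIdxAux (l :: ls) 0 ++ [(((l :: ls).length : Nat) : Int)])).map
        (fun ab => PySem.List.slice (l :: ls) (some (ab.1 + 1)) (some ab.2))
      = (pvSegs (l :: ls)).1 :: (pvSegs (l :: ls)).2
    rw [hlen]
    have hcomp : ∀ (L : List (Int × Int)), (∀ p ∈ L, p ∈ pvPairs
          ((-1 : Int) :: pvIdxAux ls 0 ++ [(ls.length : Int)])) →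
        (L.map (fun p => (p.1 + 1, p.2 + 1))).map
            (fun ab => PySem.List.slice (l :: ls) (some (ab.1 + 1)) (some ab.2))
          = L.map (fun ab => PySem.List.slice ls (some (ab.1 + 1)) (some ab.2)) := by
      intro L hL
      rw [List.map_map]
      refine List.map_congr_left (fun p hp => ?_)
      simpa using hshift p (hL p hp)
    by_cases hsep : pvSep l
    · -- separator line: new empty first segment, all old bounds shifted by one
      have hI : pvIdxAux (l :: ls) 0 = (0 : Int) :: (pvIdxAux ls 0).map (· + 1) := by
        have hs := pvIdxAux_shift ls 0
        norm_num at hs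
        simp [pvIdxAux, hsep, hs]
      have hb : (-1 : Int) :: pvIdxAux (l :: ls) 0 ++ [(ls.length : Int) + 1]
          = (-1 : Int) :: (((-1 : Int) :: pvIdxAux ls 0 ++ [(ls.length : Int)]).map (· + 1)) := by
        rw [hI]; simp
      rw [hb]
      rw [show ((-1 : Int) :: pvIdxAux ls 0 ++ [(ls.length : Int)]).map (· + 1)
            = (-1 + 1 : Int) :: ((pvIdxAux ls 0 ++ [(ls.length : Int)]).map (· + 1)) from by simp]
      rw [pvPairs_cons₂]
      rw [show ((-1 + 1 : Int) :: ((pvIdxAux ls 0 ++ [(ls.length : Int)]).map (· + 1)))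
            = (((-1 : Int) :: pvIdxAux ls 0 ++ [(ls.length : Int)]).map (· + 1)) from by simp]
      rw [pvPairs_map, List.map_cons]
      dsimp only
      rw [show (-1 : Int) + 1 = 0 from by ring, PySem.List.slice_toNat _ le_rfl le_rfl]
      rw [hcomp _ (fun p hp => hp), ih']
      simp [pvSegs, hsep]
    · -- ordinary line: it is prepended to the first segment
      have hI : pvIdxAux (l :: ls) 0 = (pvIdxAux ls 0).map (· + 1) := by
        have hs := pvIdxAux_shift ls 0
        norm_num at hs
        simp [pvIdxAux, hsep, hs]
      have ihc : ((-1 : Int) :: pvIdxAux ls 0 ++ [(ls.length : Int)]) = (-1 : Int) :: t0 :: T' := by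
        rw [List.cons_append, hT]
      rw [ihc, pvPairs_cons₂, List.map_cons] at ih'
      injection ih' with hh1 hh2
      have hb : (-1 : Int) :: pvIdxAux (l :: ls) 0 ++ [(ls.length : Int) + 1]
          = (-1 : Int) :: ((t0 :: T').map (· + 1)) := by
        rw [hI, List.cons_append, ← hT]
        simp
      rw [hb]
      rw [show ((t0 :: T').map (· + 1)) = (t0 + 1) :: T'.map (· + 1) from by simp]
      rw [pvPairs_cons₂]
      rw [show ((t0 + 1) :: T'.map (· + 1)) = ((t0 :: T').map (· + 1)) from by simp]
      rw [pvPairs_map, List.map_cons]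
      dsimp only
      rw [show (-1 : Int) + 1 = 0 from by ring]
      rw [pvSlice_cons_zero l ls t0 ht0]
      dsimp only at hh1
      rw [show (-1 : Int) + 1 = 0 from by ring] at hh1
      rw [hh1]
      have hmem : ∀ p ∈ pvPairs (t0 :: T'), p ∈ pvPairs
          ((-1 : Int) :: pvIdxAux ls 0 ++ [(ls.length : Int)]) := by
        intro p hp
        rw [ihc, pvPairs_cons₂]
        exact List.mem_cons_of_mem _ hp
      rw [hcomp _ hmem, hh2]
      simp [pvSegs, hsep]

-- A's dedup loop over the block joins = pvAdj over the stripped nonempty block values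
theorem pvDedup_char (bs : List (List String)) : ∀ (acc : List String) (prev : Option String),
    ((pvJoins bs).foldl pvDedupStep (acc, prev)).1
    = acc ++ pvAdj prev ((bs.map (fun b => PySem.Str.strip (PySem.Str.join " " b))).filter
        (fun v => v != "")) := by
  induction bs with
  | nil => intro acc prev; simp [pvJoins, pvAdj]
  | cons b bs ih =>
    intro acc prev
    by_cases hb : b = []
    · have hv : PySem.Str.strip (PySem.Str.join " " ([] : List String)) = "" := by decide
      simp only [pvJoins] at ih
      simp [pvJoins, hb, hv, ih]
    · simp only [pvJoins, List.filterMap_cons, hb, List.map_cons, List.filter_cons]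
      by_cases hv : PySem.Str.strip (PySem.Str.join " " b) = ""
      · have hstep : pvDedupStep (acc, prev) (PySem.Str.join " " b) = (acc, prev) := by
          unfold pvDedupStep; simp [hv]
        simp only [pvJoins] at ih
        simp [hstep, hv, ih]
      · by_cases hp : some (PySem.Str.strip (PySem.Str.join " " b)) = prev
        · have hstep : pvDedupStep (acc, prev) (PySem.Str.join " " b) = (acc, prev) := by
            unfold pvDedupStep; simp [hp]
          simp only [pvJoins] at ih
          simp [hstep, hv, pvAdj, hp, ih]
        · have hstep : pvDedupStep (acc, prev) (PySem.Str.join " " b)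
              = (acc ++ [PySem.Str.strip (PySem.Str.join " " b)],
                 some (PySem.Str.strip (PySem.Str.join " " b))) := by
            unfold pvDedupStep; simp [hv, hp]
          simp only [pvJoins] at ih
          simp [hstep, hv, pvAdj, hp, ih]

theorem pvAdj_some (xs : List String) : ∀ (p : String), pvAdj (some p) xs = pvRun p xs := by
  induction xs with
  | nil => intro p; rfl
  | cons y ys ih =>
    intro p
    by_cases h : y = p <;> simp [pvAdj, pvRun, h, ih]

-- B's index comprehension tail = pvRun
theorem pvCompr_tail (xs : List String) : ∀ (ne : List String) (k : Nat) (p : String),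
    ne[k]? = some p → ne.drop (k + 1) = xs →
    ((PySem.List.enumerate xs ((k : Int) + 1)).filter
        (fun q => q.1 == 0 || PySem.List.pyGet? ne (q.1 - 1) != some q.2)).map (·.2)
    = pvRun p xs := by
  induction xs with
  | nil => intro ne k p _ _; simp [PySem.List.enumerate_nil, pvRun]
  | cons y ys ih =>
    intro ne k p hget hdrop
    rw [PySem.List.enumerate_cons]
    have hk0 : (((k : Int) + 1) == 0) = false := by
      simp only [beq_eq_false_iff_ne, ne_eq]; omega
    have hget' : PySem.List.pyGet? ne ((k : Int) + 1 - 1) = some p := by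
      rw [show (k : Int) + 1 - 1 = (k : Int) from by ring, PySem.List.pyGet?_natCast]
      exact hget
    have hget1 : ne[k + 1]? = some y := by
      have h : (ne.drop (k + 1))[0]? = ne[(k + 1) + 0]? := List.getElem?_drop
      rw [hdrop] at h
      simpa using h.symm
    have hdrop1 : ne.drop (k + 1 + 1) = ys := by
      have h : ne.drop (k + 1 + 1) = (ne.drop (k + 1)).drop 1 := by
        rw [List.drop_drop]
      rw [h, hdrop]
      rfl
    have hcast : (k : Int) + 1 + 1 = ((k + 1 : Nat) : Int) + 1 := by push_cast; ring
    have ihy := ih ne (k + 1) y hget1 hdrop1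
    by_cases hyp : y = p
    · subst hyp
      simp only [List.filter_cons, hk0, Bool.false_or, hget', pvRun]
      simp only [bne_self_eq_false, Bool.false_eq_true, if_false]
      rw [hcast]
      simpa [pvRun] using ihy
    · have hne : (some p != some y) = true := by simp [hyp, Ne.symm]
      simp only [List.filter_cons, hk0, Bool.false_or, hget', hne, if_true, List.map_cons]
      rw [hcast, ihy]
      simp [pvRun, hyp]

-- B's index comprehension = pvAdj none
theorem pvCompr_char (ne : List String) :
    ((PySem.List.enumerate ne).filter
        (fun p => p.1 == 0 || PySem.List.pyGet? ne (p.1 - 1) != some p.2)).map (·.2)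
    = pvAdj none ne := by
  cases ne with
  | nil => simp [PySem.List.enumerate_nil, pvAdj]
  | cons x xs =>
    rw [PySem.List.enumerate_cons]
    simp only [List.filter_cons, show ((0 : Int) == 0) = true from rfl, Bool.true_or,
      if_true, List.map_cons]
    rw [show (0 : Int) + 1 = ((0 : Nat) : Int) + 1 from by norm_num]
    rw [pvCompr_tail xs (x :: xs) 0 x (by rfl) (by rfl)]
    simp [pvAdj, pvAdj_some]

-- the per-block value A's dedup loop computes is B's group
theorem pvMap_v_proc (segs : List (List String)) :
    (segs.map pvProc).map (fun b => PySem.Str.strip (PySem.Str.join " " b)) = segs.map pvGroup := by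
  rw [List.map_map]
  rfl

-- pushing pvGroup inside a map
theorem pvMap_group_comm (f : Int × Int → List String) (L : List (Int × Int)) :
    L.map (fun ab => pvGroup (f ab)) = (L.map f).map pvGroup := by
  induction L with
  | nil => rfl
  | cons a t ih => simp only [List.map_cons, ih]

-- slicing + cleaning between consecutive bounds, B's groups list
theorem pvSlice_group (ls : List String) :
    (((-1 : Int) :: pvIdxAux ls 0 ++ [(ls.length : Int)]).zip
        (((-1 : Int) :: pvIdxAux ls 0 ++ [(ls.length : Int)]).tail)).map
      (fun ab => pvGroup (PySem.List.slice ls (some (ab.1 + 1)) (some ab.2)))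
    = pvGroup (pvSegs ls).1 :: ((pvSegs ls).2.map pvGroup) := by
  rw [pvMap_group_comm (fun ab => PySem.List.slice ls (some (ab.1 + 1)) (some ab.2)),
      pvSlice_char, List.map_cons]

-- ===== VERDICT (by name: the statement is the Claim_ definition above) =====
set_option maxHeartbeats 2000000 in
theorem clean_caption_text_spec : Claim_equal_clean_caption_text := by
  intro content _
  unfold Spec_clean_caption_text clean_caption_text clean_caption_text_alt
  simp only []
  rw [pvA_char ((PySem.Str.split? content "\n").getD []) [] []]
  simp only [List.nil_append]
  rw [pvDedup_char _ [] none]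
  simp only [List.nil_append]
  rw [pvIdx_char ((PySem.Str.split? content "\n").getD []) 0]
  simp only [pvSlice_group, pvCompr_char, List.map_cons, pvMap_v_proc,
    show PySem.Str.strip (PySem.Str.join " "
        (pvProc (pvSegs ((PySem.Str.split? content "\n").getD [])).1))
      = pvGroup (pvSegs ((PySem.Str.split? content "\n").getD [])).1 from rfl]
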